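-- pv_equiv track=rewrite | github.com/Rickwu93/leetcode-practice | cisco.py | identify_non_twin
-- ===== SOURCE A (Python) =====
-- def identify_non_twin(inputArr_size, inputArr):
--     countDict = {}
--     for i in inputArr:
--         if i in countDict:
--             countDict[i] += 1
--         else:
--             countDict[i] = 1
--     nonTwinList = [k for k, v in countDict.items() if v == 1]
--     if len(nonTwinList) == 0:
--         return -1
--     else:
--         return min(nonTwinList)
-- ===== SOURCE B (Python) =====
-- def identify_non_twin(inputArr_size, inputArr):
--     s = sorted(inputArr)
--     i, n = 0, len(s)
--     while i < n:
--         j = i + 1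
--         while j < n and s[j] == s[i]:
--             j += 1
--         if j == i + 1:
--             return s[i]
--         i = j
--     return -1
-- ===== Notes on version B (the rewrite author's own statement) =====
-- stated objective: alternative
-- what changed: Replaced A's dict-based occurrence counting plus min over count-1 keys with sorting a copy and a single scan over runs of equal neighbours, returning the head of the first length-1 run.
import Mathlib
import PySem

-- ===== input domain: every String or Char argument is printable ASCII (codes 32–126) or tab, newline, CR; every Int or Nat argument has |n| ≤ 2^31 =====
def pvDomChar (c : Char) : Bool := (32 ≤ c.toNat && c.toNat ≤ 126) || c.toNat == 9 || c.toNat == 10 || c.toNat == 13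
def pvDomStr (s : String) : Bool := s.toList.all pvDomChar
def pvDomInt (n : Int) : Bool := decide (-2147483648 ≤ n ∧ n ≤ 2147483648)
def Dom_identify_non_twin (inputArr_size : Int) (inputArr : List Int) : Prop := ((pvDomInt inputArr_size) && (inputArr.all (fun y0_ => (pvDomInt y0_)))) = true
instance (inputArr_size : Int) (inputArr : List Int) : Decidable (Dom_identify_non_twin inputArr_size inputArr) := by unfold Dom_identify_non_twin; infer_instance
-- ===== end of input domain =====

-- B replaces A's dict-counting pass with sort-then-scan over runs of equal
-- neighbours (alternative decomposition, similar cost); return values agree on all inputs.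

-- ===== PORT A =====
-- A: count occurrences in a dict, collect keys with count 1, return their min (or -1).
def identify_non_twin (inputArr_size : Int) (inputArr : List Int) : Int :=
  let countDict : PySem.Dict Int Int :=
    inputArr.foldl (fun d i =>
      if d.contains i then d.modify i 0 (· + 1) else d.insert i 1) PySem.Dict.empty
  let nonTwinList := (countDict.items.filter (fun kv => kv.2 == 1)).map Prod.fst
  if nonTwinList.length = 0 then -1
  else (PySem.List.min? nonTwinList (fun x => x)).getD (-1)

-- ===== PORT B =====
-- B's outer while-loop: look at the head of the (sorted) remainder; if the next
-- element equals it, skip the whole run of equal elements, else return the head.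
def pvRunScan : List Int → Int
  | [] => -1
  | x :: rest =>
      if rest.head? = some x then pvRunScan (rest.dropWhile (· == x))
      else x
termination_by s => s.length
decreasing_by
  simp only [List.length_cons]
  exact Nat.lt_succ_of_le (List.length_dropWhile_le _ _)

def identify_non_twin_alt (inputArr_size : Int) (inputArr : List Int) : Int :=
  pvRunScan (PySem.List.sorted inputArr (fun y => y) false)

-- ===== PRECONDITION & SPEC =====
def Spec_identify_non_twin (inputArr_size : Int) (inputArr : List Int) (out : Int) : Prop := out = identify_non_twin_alt inputArr_size inputArr
instance (inputArr_size : Int) (inputArr : List Int) (out : Int) : Decidable (Spec_identify_non_twin inputArr_size inputArr out) := by unfold Spec_identify_non_twin; infer_instance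

-- ===== CLAIM (what is proved, stated in full; the proofs are below) =====
def Claim_equal_identify_non_twin : Prop := ∀ (inputArr_size : Int) (inputArr : List Int), Dom_identify_non_twin inputArr_size inputArr → Spec_identify_non_twin inputArr_size inputArr (identify_non_twin inputArr_size inputArr)

-- ===== LEMMAS AND PROOFS =====

-- common value both programs compute: min of the given candidate list, -1 when empty
def pvSpecVal (l : List Int) : Int := (PySem.List.min? l (fun x => x)).getD (-1)

lemma pv_min?_id_congr (l1 l2 : List Int) (h : ∀ y, y ∈ l1 ↔ y ∈ l2) :
    PySem.List.min? l1 (fun x => x) = PySem.List.min? l2 (fun x => x) := by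
  rcases h1 : PySem.List.min? l1 (fun x => x) with _ | m1 <;>
    rcases h2 : PySem.List.min? l2 (fun x => x) with _ | m2
  · rfl
  · rw [PySem.List.min?_eq_none_iff] at h1
    have := (h m2).mpr (PySem.List.min?_mem h2)
    simp [h1] at this
  · rw [PySem.List.min?_eq_none_iff] at h2
    have := (h m1).mp (PySem.List.min?_mem h1)
    simp [h2] at this
  · have hm1 := PySem.List.min?_mem h1
    have hm2 := PySem.List.min?_mem h2
    have a1 := PySem.List.min?_isMin h1 m2 ((h m2).mpr hm2)
    have a2 := PySem.List.min?_isMin h2 m1 ((h m1).mp hm1)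
    exact congrArg some (le_antisymm a1 a2)

lemma pv_step_eq (d : PySem.Dict Int Int) (i : Int) :
    (if d.contains i then d.modify i 0 (· + 1) else d.insert i 1) = d.modify i 0 (· + 1) := by
  by_cases h : d.contains i
  · simp [h]
  · rw [Bool.not_eq_true] at h
    simp only [h, if_neg Bool.false_ne_true]
    apply PySem.Dict.ext
    rw [PySem.Dict.items_insert_of_not_contains d 1 h]
    simp only [PySem.Dict.modify]
    rw [PySem.Dict.getD_of_not_contains (h := h),
        PySem.Dict.items_insert_of_not_contains d _ h]
    norm_num

lemma pv_A_eq (sz : Int) (xs : List Int) :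
    identify_non_twin sz xs =
      pvSpecVal ((PySem.Set.ofList xs : List Int).filter (fun k => xs.count k == 1)) := by
  unfold identify_non_twin
  have hstep : (fun (d : PySem.Dict Int Int) (i : Int) =>
      if d.contains i then d.modify i 0 (· + 1) else d.insert i 1) =
      (fun (d : PySem.Dict Int Int) (i : Int) => d.modify i 0 (· + 1)) :=
    funext fun d => funext fun i => pv_step_eq d i
  rw [hstep]
  have hc : (xs.foldl (fun (d : PySem.Dict Int Int) i => d.modify i 0 (· + 1))
      PySem.Dict.empty) = PySem.Dict.counter xs := rfl
  rw [hc]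
  dsimp only
  rw [PySem.Dict.items_counter]
  rw [List.filter_map, List.map_map]
  have hpred : ((fun kv : Int × Int => kv.2 == 1) ∘ fun k => (k, (List.count k xs : Int)))
      = fun k => xs.count k == 1 := by
    funext k
    simp [Function.comp, Nat.cast_eq_one, List.count]
  have hfst : (Prod.fst ∘ fun k : Int => (k, (List.count k xs : Int))) = id := rfl
  rw [hpred, hfst, List.map_id]
  set l := (PySem.Set.ofList xs : List Int).filter (fun k => xs.count k == 1) with hl
  by_cases hnil : l = []
  · simp [hnil, pvSpecVal, PySem.List.min?]
  · have : l.length ≠ 0 := by simpa using hnil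
    simp [this, pvSpecVal]

lemma pvSpecVal_eq_of_min (l : List Int) (x : Int) (hx : x ∈ l) (hmin : ∀ y ∈ l, x ≤ y) :
    pvSpecVal l = x := by
  unfold pvSpecVal
  cases h : PySem.List.min? l (fun y => y) with
  | none =>
    rw [PySem.List.min?_eq_none_iff] at h
    rw [h] at hx; simp at hx
  | some m =>
    have h1 : m ≤ x := PySem.List.min?_isMin h x hx
    have h2 : x ≤ m := hmin m (PySem.List.min?_mem h)
    simpa using le_antisymm h1 h2

lemma pv_runScan_eq (s : List Int) (hs : s.Pairwise (· ≤ ·)) :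
    pvRunScan s = pvSpecVal (s.filter (fun k => s.count k == 1)) := by
  induction s using pvRunScan.induct with
  | case1 =>
    simp [pvRunScan, pvSpecVal, PySem.List.min?]
  | case2 x rest hhd ih =>
    obtain ⟨t, rfl⟩ : ∃ t, rest = x :: t := by
      cases rest with
      | nil => simp at hhd
      | cons a t =>
        simp only [List.head?_cons, Option.some.injEq] at hhd
        exact ⟨t, by rw [hhd]⟩
    rw [pvRunScan]
    simp only [List.head?_cons, if_true]
    set r := (x :: t).dropWhile (· == x) with hr
    have hrt : r = t.dropWhile (· == x) := by simp [hr]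
    have hsub : r.Sublist (x :: x :: t) := by
      rw [hrt]
      exact ((t.dropWhile_sublist _).trans (List.sublist_cons_self _ _)).trans
        (List.sublist_cons_self _ _)
    have hrp : r.Pairwise (· ≤ ·) := hs.sublist hsub
    rw [ih hrp]
    have hxle : ∀ y ∈ (x :: x :: t), x ≤ y := by
      intro y hy
      simp only [List.mem_cons] at hy
      rcases hy with rfl | rfl | hy
      · exact le_refl y
      · exact le_refl y
      · exact (List.pairwise_cons.mp hs).1 y (by simp [hy])
    have hxr : x ∉ r := by
      cases hr2 : r with
      | nil => simp
      | cons z r' =>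
        intro hmem
        have hz : (z == x) = false := by
          have h3 := List.head?_dropWhile_not (· == x) t
          rw [← hrt, hr2] at h3
          simpa using h3
        have hzx : z ≠ x := by simpa using hz
        have hzs : z ∈ (x :: x :: t) := (hr2 ▸ hsub).subset (List.mem_cons_self ..)
        have hxz : x ≤ z := hxle z hzs
        have hzle : ∀ y ∈ r', z ≤ y := (List.pairwise_cons.mp (hr2 ▸ hrp)).1
        simp only [List.mem_cons] at hmem
        rcases hmem with h4 | h4
        · exact hzx h4.symm
        · exact hzx (le_antisymm (hzle x h4) hxz)
    have htw : ∀ y ∈ t.takeWhile (· == x), y = x := by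
      intro y hy
      simpa using List.mem_takeWhile_imp hy
    have hts : t = t.takeWhile (· == x) ++ r := by
      rw [hrt]; exact (List.takeWhile_append_dropWhile).symm
    have hcount : ∀ y : Int, y ≠ x → List.count y (x :: x :: t) = List.count y r := by
      intro y hy
      have hxy : ¬ ((x == y) = true) := by
        intro h
        have hx2 : x = y := by simpa using h
        exact hy hx2.symm
      simp only [List.count_cons, if_neg hxy, add_zero]
      conv_lhs => rw [hts]
      rw [List.count_append]
      have h0 : List.count y (t.takeWhile (· == x)) = 0 := by
        rw [List.count_eq_zero]
        intro hmem
        exact hy (htw y hmem)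
      omega
    have hcx : List.count x (x :: x :: t) ≠ 1 := by
      rw [List.count_cons_self, List.count_cons_self]
      omega
    apply congrArg (fun o : Option Int => o.getD (-1))
    apply pv_min?_id_congr
    intro y
    simp only [List.mem_filter, beq_iff_eq]
    constructor
    · rintro ⟨hyr, hyc⟩
      have hyx : y ≠ x := fun h => hxr (by rw [h] at hyr; exact hyr)
      exact ⟨hsub.subset hyr, by rw [hcount y hyx]; exact hyc⟩
    · rintro ⟨hys, hyc⟩
      have hyx : y ≠ x := fun h => hcx (by rw [h] at hyc; exact hyc)
      have hyr : y ∈ r := by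
        simp only [List.mem_cons] at hys
        rcases hys with h1 | h1 | hyt
        · exact absurd h1 hyx
        · exact absurd h1 hyx
        · rw [hts] at hyt
          rcases List.mem_append.mp hyt with hyw | hyr
          · exact absurd (htw y hyw) hyx
          · exact hyr
      exact ⟨hyr, by rw [← hcount y hyx]; exact hyc⟩
  | case3 x rest hhd =>
    rw [pvRunScan]
    simp only [if_neg hhd]
    have hxle : ∀ y ∈ rest, x ≤ y := (List.pairwise_cons.mp hs).1
    have hxnr : x ∉ rest := by
      cases hrest : rest with
      | nil => simp
      | cons z t =>
        intro hmem
        have hzx : z ≠ x := by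
          intro h; exact hhd (by simp [hrest, h])
        have hzle : ∀ y ∈ t, z ≤ y :=
          (List.pairwise_cons.mp (List.pairwise_cons.mp (hrest ▸ hs)).2).1
        have hxz : x ≤ z := hxle z (by simp [hrest])
        simp only [List.mem_cons] at hmem
        rcases hmem with h4 | h4
        · exact hzx h4.symm
        · exact hzx (le_antisymm (hzle x h4) hxz)
    have hcx : List.count x (x :: rest) = 1 := by
      rw [List.count_cons_self, List.count_eq_zero.mpr hxnr]
    have hxmem : x ∈ (x :: rest).filter (fun k => List.count k (x :: rest) == 1) := by
      simp only [List.mem_filter, beq_iff_eq]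
      exact ⟨by simp, hcx⟩
    symm
    apply pvSpecVal_eq_of_min _ x hxmem
    intro y hy
    have h5 := (List.mem_filter.mp hy).1
    simp only [List.mem_cons] at h5
    rcases h5 with rfl | hyr
    · exact le_refl y
    · exact hxle y hyr

-- ===== VERDICT (by name: the statement is the Claim_ definition above) =====
theorem identify_non_twin_spec : Claim_equal_identify_non_twin := by
  intro sz xs _
  unfold Spec_identify_non_twin identify_non_twin_alt
  rw [pv_A_eq]
  have hperm := PySem.List.sorted_perm xs (fun y => y) false
  rw [pv_runScan_eq _ (PySem.List.sorted_pairwise xs (fun y => y))]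
  unfold pvSpecVal
  rw [pv_min?_id_congr]
  intro y
  simp only [List.mem_filter, PySem.Set.mem_ofList, hperm.mem_iff, hperm.count_eq]
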